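-- pv_equiv track=rewrite | github.com/oscar1098/python-campus | clase24-03/numMayorMenos.py | calculaMaxMin
-- ===== SOURCE A (Python) =====
-- def calculaMaxMin(arreglo,arreglo2):
--
--     for i in range(len(arreglo)):
--         cont = 0
--         for j in arreglo:
--             if arreglo[i] > j:
--                 cont +=1
--         if cont == (len(arreglo)-1):
--             arreglo2[0] = arreglo[i]
--
--     for i in range(len(arreglo)):
--         cont = 0
--         for j in arreglo:
--             if arreglo[i] < j:
--                 cont +=1
--         if cont == (len(arreglo)-1):
--             arreglo2[1] = arreglo[i]
--     return arreglo2
-- ===== SOURCE B (Python) =====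
-- def calculaMaxMin(arreglo, arreglo2):
--     # Single pass: track current max/min and how many times each occurs.
--     # Write the position only when the extremum is unique (strict), exactly as A.
--     if arreglo:
--         mx = mn = arreglo[0]
--         cmx = cmn = 1
--         for y in arreglo[1:]:
--             if y > mx:
--                 mx, cmx = y, 1
--             elif y == mx:
--                 cmx += 1
--             if y < mn:
--                 mn, cmn = y, 1
--             elif y == mn:
--                 cmn += 1
--         if cmx == 1:
--             arreglo2[0] = mx
--         if cmn == 1:
--             arreglo2[1] = mn
--     return arreglo2
-- ===== Notes on version B (the rewrite author's own statement) =====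
-- stated objective: faster
-- what changed: Replaces A's two nested O(n^2) counting loops (count how many elements each item beats) with a single O(n) pass that tracks the running max/min together with their occurrence counts and writes each slot only when that count is 1.
import Mathlib
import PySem

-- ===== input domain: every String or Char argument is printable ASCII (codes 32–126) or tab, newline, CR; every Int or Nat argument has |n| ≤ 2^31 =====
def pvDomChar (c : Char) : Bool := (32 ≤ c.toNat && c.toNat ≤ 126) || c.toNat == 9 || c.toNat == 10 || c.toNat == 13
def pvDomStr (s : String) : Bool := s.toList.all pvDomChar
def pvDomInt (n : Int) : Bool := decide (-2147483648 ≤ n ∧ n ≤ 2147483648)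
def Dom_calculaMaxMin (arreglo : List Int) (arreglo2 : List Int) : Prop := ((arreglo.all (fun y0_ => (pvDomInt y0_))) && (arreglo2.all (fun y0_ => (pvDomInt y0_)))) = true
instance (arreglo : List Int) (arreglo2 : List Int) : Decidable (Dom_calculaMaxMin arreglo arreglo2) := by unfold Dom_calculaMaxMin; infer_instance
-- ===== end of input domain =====

-- B replaces A's two nested O(n^2) counting loops by one O(n) pass tracking max/min with
-- occurrence counts (objective: faster). Both A and B mutate arreglo2 in place identically;
-- the equivalence proved here is about the return value.

-- ===== PORT A =====
-- Python's `for i in range(len(arreglo))` reads only arreglo[i]; ported as a fold over the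
-- elements in the same order (same values, same iterations). `List.set` is exact here:
-- Pre_ guarantees every assignment `arreglo2[k] = v` that A executes is in range.
def calculaMaxMin (arreglo : List Int) (arreglo2 : List Int) : List Int :=
  let n : Int := arreglo.length
  let a2 := arreglo.foldl (fun acc x =>
      let cont : Int := arreglo.foldl (fun c j => if x > j then c + 1 else c) 0
      if cont = n - 1 then acc.set 0 x else acc) arreglo2
  arreglo.foldl (fun acc x =>
      let cont : Int := arreglo.foldl (fun c j => if x < j then c + 1 else c) 0
      if cont = n - 1 then acc.set 1 x else acc) a2

-- ===== PORT B =====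
-- one step of B's single pass: update (max, its count, min, its count) with the next element
def pvStepB (s : Int × Int × Int × Int) (y : Int) : Int × Int × Int × Int :=
  let (mx, cmx, mn, cmn) := s
  let (mx, cmx) := if y > mx then (y, (1 : Int)) else if y = mx then (mx, cmx + 1) else (mx, cmx)
  let (mn, cmn) := if y < mn then (y, (1 : Int)) else if y = mn then (mn, cmn + 1) else (mn, cmn)
  (mx, cmx, mn, cmn)

def calculaMaxMin_alt (arreglo : List Int) (arreglo2 : List Int) : List Int :=
  match arreglo with
  | [] => arreglo2
  | x :: xs =>
    let s := xs.foldl pvStepB (x, 1, x, 1)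
    let a2 := if s.2.1 = 1 then arreglo2.set 0 s.1 else arreglo2
    if s.2.2.2 = 1 then a2.set 1 s.2.2.1 else a2

-- ===== PRECONDITION & SPEC =====
-- Pre_ excludes exactly the inputs on which A raises IndexError: arreglo2 too short for an
-- assignment A actually executes (A writes arreglo2[0] iff arreglo has a unique strict
-- maximum, arreglo2[1] iff it has a unique strict minimum).  B raises there too.
def Pre_calculaMaxMin (arreglo : List Int) (arreglo2 : List Int) : Prop :=
  ((∃ x ∈ arreglo, arreglo.countP (fun j => decide (x ≤ j)) = 1) → 1 ≤ arreglo2.length) ∧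
  ((∃ x ∈ arreglo, arreglo.countP (fun j => decide (j ≤ x)) = 1) → 2 ≤ arreglo2.length)
instance (arreglo : List Int) (arreglo2 : List Int) : Decidable (Pre_calculaMaxMin arreglo arreglo2) := by
  unfold Pre_calculaMaxMin; infer_instance

def pvWitness_calculaMaxMin : List Int × List Int := ([1, 2], [0, 0])

def Spec_calculaMaxMin (arreglo : List Int) (arreglo2 : List Int) (out : List Int) : Prop := out = calculaMaxMin_alt arreglo arreglo2
instance (arreglo : List Int) (arreglo2 : List Int) (out : List Int) : Decidable (Spec_calculaMaxMin arreglo arreglo2 out) := by unfold Spec_calculaMaxMin; infer_instance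

-- ===== CLAIM (what is proved, stated in full; the proofs are below) =====
def Claim_equal_calculaMaxMin : Prop := ∀ (arreglo : List Int) (arreglo2 : List Int), Dom_calculaMaxMin arreglo arreglo2 → Pre_calculaMaxMin arreglo arreglo2 → Spec_calculaMaxMin arreglo arreglo2 (calculaMaxMin arreglo arreglo2)

-- ===== LEMMAS AND PROOFS =====

-- running maximum / minimum of x :: l
def lmax (x : Int) (l : List Int) : Int := l.foldl max x
def lmin (x : Int) (l : List Int) : Int := l.foldl min x

theorem lmax_append (x : Int) (l : List Int) (y : Int) : lmax x (l ++ [y]) = max (lmax x l) y := by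
  simp [lmax]
theorem lmin_append (x : Int) (l : List Int) (y : Int) : lmin x (l ++ [y]) = min (lmin x l) y := by
  simp [lmin]

theorem le_lmax_self (x : Int) (l : List Int) : x ≤ lmax x l := by
  induction l generalizing x with
  | nil => simp [lmax]
  | cons b l ih => exact le_trans (le_max_left x b) (ih (max x b))

theorem lmin_le_self (x : Int) (l : List Int) : lmin x l ≤ x := by
  induction l generalizing x with
  | nil => simp [lmin]
  | cons b l ih => exact le_trans (ih (min x b)) (min_le_left x b)

theorem mem_le_lmax (x a : Int) (l : List Int) (h : a ∈ l) : a ≤ lmax x l := by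
  induction l generalizing x with
  | nil => simp at h
  | cons b l ih =>
    rcases List.mem_cons.mp h with rfl | h'
    · exact le_trans (le_max_right x a) (le_lmax_self (max x a) l)
    · exact ih (max x b) h'

theorem lmin_le_mem (x a : Int) (l : List Int) (h : a ∈ l) : lmin x l ≤ a := by
  induction l generalizing x with
  | nil => simp at h
  | cons b l ih =>
    rcases List.mem_cons.mp h with rfl | h'
    · exact le_trans (lmin_le_self (min x a) l) (min_le_right x a)
    · exact ih (min x b) h'

theorem lmax_mem (x : Int) (l : List Int) : lmax x l = x ∨ lmax x l ∈ l := by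
  induction l generalizing x with
  | nil => left; rfl
  | cons b l ih =>
    have e : lmax x (b :: l) = lmax (max x b) l := rfl
    rcases ih (max x b) with h | h
    · rcases max_choice x b with hc | hc
      · exact Or.inl (by rw [e, h, hc])
      · exact Or.inr (by rw [e, h, hc]; exact List.mem_cons_self)
    · exact Or.inr (List.mem_cons_of_mem b (e ▸ h))
theorem lmin_mem (x : Int) (l : List Int) : lmin x l = x ∨ lmin x l ∈ l := by
  induction l generalizing x with
  | nil => left; rfl
  | cons b l ih =>
    have e : lmin x (b :: l) = lmin (min x b) l := rfl
    rcases ih (min x b) with h | h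
    · rcases min_choice x b with hc | hc
      · exact Or.inl (by rw [e, h, hc])
      · exact Or.inr (by rw [e, h, hc]; exact List.mem_cons_self)
    · exact Or.inr (List.mem_cons_of_mem b (e ▸ h))

theorem all_le_lmax (x a : Int) (l : List Int) (h : a ∈ x :: l) : a ≤ lmax x l := by
  rcases List.mem_cons.mp h with rfl | h'
  · exact le_lmax_self _ _
  · exact mem_le_lmax _ _ _ h'
theorem lmin_le_all (x a : Int) (l : List Int) (h : a ∈ x :: l) : lmin x l ≤ a := by
  rcases List.mem_cons.mp h with rfl | h'
  · exact lmin_le_self _ _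
  · exact lmin_le_mem _ _ _ h'

theorem lmax_mem_cons (x : Int) (l : List Int) : lmax x l ∈ x :: l := by
  rcases lmax_mem x l with h | h
  · rw [h]; exact List.mem_cons_self
  · exact List.mem_cons_of_mem x h
theorem lmin_mem_cons (x : Int) (l : List Int) : lmin x l ∈ x :: l := by
  rcases lmin_mem x l with h | h
  · rw [h]; exact List.mem_cons_self
  · exact List.mem_cons_of_mem x h

-- a list containing two distinct elements has length ≥ 2
theorem two_le_length_of_mem (a b : Int) (m : List Int) (ha : a ∈ m) (hb : b ∈ m) (hab : a ≠ b) :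
    2 ≤ m.length := by
  induction m with
  | nil => simp at ha
  | cons c m ih =>
    rcases List.mem_cons.mp ha with rfl | ha'
    · have hb' : b ∈ m := by
        rcases List.mem_cons.mp hb with rfl | h
        · exact absurd rfl hab
        · exact h
      have := List.length_pos_of_mem hb'; simp; omega
    · rcases List.mem_cons.mp hb with rfl | hb'
      · have := List.length_pos_of_mem ha'; simp; omega
      · have := ih ha' hb'; simp; omega

theorem two_le_countP (p : Int → Bool) (a b : Int) (m : List Int) (ha : a ∈ m) (hb : b ∈ m)
    (hab : a ≠ b) (hpa : p a = true) (hpb : p b = true) : 2 ≤ m.countP p := by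
  rw [List.countP_eq_length_filter]
  exact two_le_length_of_mem a b _ (List.mem_filter.mpr ⟨ha, hpa⟩) (List.mem_filter.mpr ⟨hb, hpb⟩) hab

-- count of the maximum equals the number of elements ≥ it (and dually for the minimum)
theorem count_lmax (x : Int) (xs : List Int) :
    (x :: xs).count (lmax x xs) = (x :: xs).countP (fun j => decide (lmax x xs ≤ j)) := by
  rw [List.count_eq_countP]
  refine List.countP_congr (fun a ha => ?_)
  have := all_le_lmax x a xs ha
  simp only [beq_iff_eq, decide_eq_true_eq]
  constructor
  · rintro rfl; exact le_refl _
  · intro h; omega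
theorem count_lmin (x : Int) (xs : List Int) :
    (x :: xs).count (lmin x xs) = (x :: xs).countP (fun j => decide (j ≤ lmin x xs)) := by
  rw [List.count_eq_countP]
  refine List.countP_congr (fun a ha => ?_)
  have := lmin_le_all x a xs ha
  simp only [beq_iff_eq, decide_eq_true_eq]
  constructor
  · rintro rfl; exact le_refl _
  · intro h; omega

-- the unique-strict-max condition, characterised
theorem max_cond_iff (x : Int) (xs : List Int) (a : Int) (ha : a ∈ x :: xs) :
    (x :: xs).countP (fun j => decide (a ≤ j)) = 1 ↔
      a = lmax x xs ∧ (x :: xs).count (lmax x xs) = 1 := by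
  constructor
  · intro h1
    have haM : a = lmax x xs := by
      by_contra hne
      have h2 : 2 ≤ (x :: xs).countP (fun j => decide (a ≤ j)) :=
        two_le_countP _ a (lmax x xs) _ ha (lmax_mem_cons x xs) hne
          (by simp) (by simp [all_le_lmax x a xs ha])
      omega
    exact ⟨haM, by rw [count_lmax, ← haM]; exact h1⟩
  · rintro ⟨rfl, hc⟩
    rw [← count_lmax]; exact hc
theorem min_cond_iff (x : Int) (xs : List Int) (a : Int) (ha : a ∈ x :: xs) :
    (x :: xs).countP (fun j => decide (j ≤ a)) = 1 ↔
      a = lmin x xs ∧ (x :: xs).count (lmin x xs) = 1 := by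
  constructor
  · intro h1
    have haM : a = lmin x xs := by
      by_contra hne
      have h2 : 2 ≤ (x :: xs).countP (fun j => decide (j ≤ a)) :=
        two_le_countP _ a (lmin x xs) _ ha (lmin_mem_cons x xs) hne
          (by simp) (by simp [lmin_le_all x a xs ha])
      omega
    exact ⟨haM, by rw [count_lmin, ← haM]; exact h1⟩
  · rintro ⟨rfl, hc⟩
    rw [← count_lmin]; exact hc

-- A's inner counter: "# of j with j < a is n-1" iff "# of j with a ≤ j is 1"
theorem cont_iff_max (l : List Int) (a : Int) (ha : a ∈ l) :
    ((l.countP (fun j => decide (a > j)) : Int) = (l.length : Int) - 1 ↔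
      l.countP (fun j => decide (a ≤ j)) = 1) := by
  have hsplit := List.length_eq_countP_add_countP (l := l) (fun j => decide (a > j))
  have hcongr : l.countP (fun j => decide ¬(decide (a > j)) = true) =
      l.countP (fun j => decide (a ≤ j)) := by
    refine List.countP_congr (fun b _ => ?_); simp
  rw [hcongr] at hsplit
  have hpos : 0 < l.countP (fun j => decide (a ≤ j)) :=
    List.countP_pos_iff.mpr ⟨a, ha, by simp⟩
  omega
theorem cont_iff_min (l : List Int) (a : Int) (ha : a ∈ l) :
    ((l.countP (fun j => decide (a < j)) : Int) = (l.length : Int) - 1 ↔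
      l.countP (fun j => decide (j ≤ a)) = 1) := by
  have hsplit := List.length_eq_countP_add_countP (l := l) (fun j => decide (a < j))
  have hcongr : l.countP (fun j => decide ¬(decide (a < j)) = true) =
      l.countP (fun j => decide (j ≤ a)) := by
    refine List.countP_congr (fun b _ => ?_); simp
  rw [hcongr] at hsplit
  have hpos : 0 < l.countP (fun j => decide (j ≤ a)) :=
    List.countP_pos_iff.mpr ⟨a, ha, by simp⟩
  omega

-- the write-fold: once the condition is "x = m", the fold is a single set (or nothing)
theorem foldl_setwrite (k : Nat) (m : Int) :
    ∀ (l' : List Int) (acc : List Int),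
      l'.foldl (fun acc x => if x = m then acc.set k x else acc) acc
        = if m ∈ l' then acc.set k m else acc := by
  intro l'
  induction l' with
  | nil => intro acc; simp
  | cons a l' ih =>
    intro acc
    by_cases ham : a = m
    · subst ham
      simp only [List.foldl_cons, ih, List.mem_cons, true_or, if_true]
      split <;> simp [List.set_set]
    · have hmn : ¬ m = a := fun h => ham h.symm
      simp only [List.foldl_cons, if_neg ham, ih, List.mem_cons]
      simp [hmn]

-- B's step, written out componentwise
theorem pvStepB_eq (mx cmx mn cmn y : Int) :
    pvStepB (mx, cmx, mn, cmn) y =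
      ((if y > mx then y else mx),
       (if y > mx then 1 else if y = mx then cmx + 1 else cmx),
       (if y < mn then y else mn),
       (if y < mn then 1 else if y = mn then cmn + 1 else cmn)) := by
  unfold pvStepB
  by_cases h1 : y > mx <;> by_cases h2 : y = mx <;> by_cases h3 : y < mn <;>
    by_cases h4 : y = mn <;> simp [h1, h2, h3, h4] <;> split_ifs <;> simp_all

-- B's single pass computes (max, count of max, min, count of min)
theorem B_inv (ys : List Int) : ∀ (x : Int) (t : List Int),
    ys.foldl pvStepB
        (lmax x t, ((x :: t).count (lmax x t) : Int), lmin x t, ((x :: t).count (lmin x t) : Int))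
      = (lmax x (t ++ ys), ((x :: (t ++ ys)).count (lmax x (t ++ ys)) : Int),
         lmin x (t ++ ys), ((x :: (t ++ ys)).count (lmin x (t ++ ys)) : Int)) := by
  induction ys with
  | nil => intro x t; simp
  | cons y ys ih =>
    intro x t
    have hcons : x :: (t ++ [y]) = (x :: t) ++ [y] := by simp
    have hstep :
        pvStepB (lmax x t, ((x :: t).count (lmax x t) : Int), lmin x t,
            ((x :: t).count (lmin x t) : Int)) y
          = (lmax x (t ++ [y]), ((x :: (t ++ [y])).count (lmax x (t ++ [y])) : Int),
             lmin x (t ++ [y]), ((x :: (t ++ [y])).count (lmin x (t ++ [y])) : Int)) := by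
      rw [pvStepB_eq, lmax_append, lmin_append]
      simp only [Prod.mk.injEq]
      refine ⟨?_, ?_, ?_, ?_⟩
      · by_cases h1 : y > lmax x t
        · simp [h1, max_eq_right (le_of_lt h1)]
        · simp [h1, max_eq_left (not_lt.mp h1)]
      · by_cases h1 : y > lmax x t
        · have hnot : y ∉ x :: t := fun hmem => absurd (all_le_lmax x y t hmem) (by omega)
          rw [if_pos h1, hcons, max_eq_right (le_of_lt h1), List.count_append,
            List.count_eq_zero.mpr hnot]
          simp
        · rw [if_neg h1, hcons, max_eq_left (not_lt.mp h1), List.count_append]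
          by_cases h2 : y = lmax x t
          · rw [if_pos h2, h2]; simp
          · rw [if_neg h2]
            have : (lmax x t) ∉ [y] := by simp; exact fun h => h2 h.symm
            rw [List.count_eq_zero.mpr this]; simp
      · by_cases h3 : y < lmin x t
        · simp [h3, min_eq_right (le_of_lt h3)]
        · simp [h3, min_eq_left (not_lt.mp h3)]
      · by_cases h3 : y < lmin x t
        · have hnot : y ∉ x :: t := fun hmem => absurd (lmin_le_all x y t hmem) (by omega)
          rw [if_pos h3, hcons, min_eq_right (le_of_lt h3), List.count_append,
            List.count_eq_zero.mpr hnot]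
          simp
        · rw [if_neg h3, hcons, min_eq_left (not_lt.mp h3), List.count_append]
          by_cases h4 : y = lmin x t
          · rw [if_pos h4, h4]; simp
          · rw [if_neg h4]
            have : (lmin x t) ∉ [y] := by simp; exact fun h => h4 h.symm
            rw [List.count_eq_zero.mpr this]; simp
    rw [List.foldl_cons, hstep, ih x (t ++ [y])]
    simp

-- A's first loop is "write the unique strict max to slot 0, if it exists"
theorem A_fold_max (x : Int) (xs : List Int) (acc : List Int) :
    (x :: xs).foldl (fun acc a =>
        let cont : Int := (x :: xs).foldl (fun c j => if a > j then c + 1 else c) 0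
        if cont = ((x :: xs).length : Int) - 1 then acc.set 0 a else acc) acc
      = if (x :: xs).count (lmax x xs) = 1 then acc.set 0 (lmax x xs) else acc := by
  by_cases hc : (x :: xs).count (lmax x xs) = 1
  · have hcg : ∀ a ∈ x :: xs, ∀ acc2 : List Int,
        (let cont : Int := (x :: xs).foldl (fun c j => if a > j then c + 1 else c) 0
         if cont = ((x :: xs).length : Int) - 1 then acc2.set 0 a else acc2)
          = (if a = lmax x xs then acc2.set 0 a else acc2) := by
      intro a ha acc2
      simp only [PySem.List.foldl_ite_add_one, zero_add]
      have hiff := (cont_iff_max (x :: xs) a ha).trans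
        ((max_cond_iff x xs a ha).trans (and_iff_left hc))
      exact if_congr hiff rfl rfl
    rw [PySem.List.foldl_congr_mem' _ _ _ _ hcg, foldl_setwrite, if_pos (lmax_mem_cons x xs),
      if_pos hc]
  · have hcg : ∀ a ∈ x :: xs, ∀ acc2 : List Int,
        (let cont : Int := (x :: xs).foldl (fun c j => if a > j then c + 1 else c) 0
         if cont = ((x :: xs).length : Int) - 1 then acc2.set 0 a else acc2)
          = acc2 := by
      intro a ha acc2
      simp only [PySem.List.foldl_ite_add_one, zero_add]
      rw [if_neg]
      intro hcond
      exact hc ((max_cond_iff x xs a ha).mp ((cont_iff_max (x :: xs) a ha).mp hcond)).2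
    rw [PySem.List.foldl_congr_mem' _ _ _ _ hcg, PySem.List.foldl_ignore, if_neg hc]

-- A's second loop is "write the unique strict min to slot 1, if it exists"
theorem A_fold_min (x : Int) (xs : List Int) (acc : List Int) :
    (x :: xs).foldl (fun acc a =>
        let cont : Int := (x :: xs).foldl (fun c j => if a < j then c + 1 else c) 0
        if cont = ((x :: xs).length : Int) - 1 then acc.set 1 a else acc) acc
      = if (x :: xs).count (lmin x xs) = 1 then acc.set 1 (lmin x xs) else acc := by
  by_cases hc : (x :: xs).count (lmin x xs) = 1
  · have hcg : ∀ a ∈ x :: xs, ∀ acc2 : List Int,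
        (let cont : Int := (x :: xs).foldl (fun c j => if a < j then c + 1 else c) 0
         if cont = ((x :: xs).length : Int) - 1 then acc2.set 1 a else acc2)
          = (if a = lmin x xs then acc2.set 1 a else acc2) := by
      intro a ha acc2
      simp only [PySem.List.foldl_ite_add_one, zero_add]
      have hiff := (cont_iff_min (x :: xs) a ha).trans
        ((min_cond_iff x xs a ha).trans (and_iff_left hc))
      exact if_congr hiff rfl rfl
    rw [PySem.List.foldl_congr_mem' _ _ _ _ hcg, foldl_setwrite, if_pos (lmin_mem_cons x xs),
      if_pos hc]
  · have hcg : ∀ a ∈ x :: xs, ∀ acc2 : List Int,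
        (let cont : Int := (x :: xs).foldl (fun c j => if a < j then c + 1 else c) 0
         if cont = ((x :: xs).length : Int) - 1 then acc2.set 1 a else acc2)
          = acc2 := by
      intro a ha acc2
      simp only [PySem.List.foldl_ite_add_one, zero_add]
      rw [if_neg]
      intro hcond
      exact hc ((min_cond_iff x xs a ha).mp ((cont_iff_min (x :: xs) a ha).mp hcond)).2
    rw [PySem.List.foldl_congr_mem' _ _ _ _ hcg, PySem.List.foldl_ignore, if_neg hc]

-- B unrolled to the same normal form
theorem B_closed (x : Int) (xs : List Int) (arreglo2 : List Int) :
    calculaMaxMin_alt (x :: xs) arreglo2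
      = (if (x :: xs).count (lmin x xs) = 1
          then (if (x :: xs).count (lmax x xs) = 1
                 then arreglo2.set 0 (lmax x xs) else arreglo2).set 1 (lmin x xs)
          else (if (x :: xs).count (lmax x xs) = 1
                 then arreglo2.set 0 (lmax x xs) else arreglo2)) := by
  have hinit : ((x : Int), (1 : Int), x, (1 : Int))
      = (lmax x ([] : List Int), (((x :: ([] : List Int)).count (lmax x [])) : Int),
         lmin x ([] : List Int), (((x :: ([] : List Int)).count (lmin x [])) : Int)) := by
    simp [lmax, lmin]
  simp only [calculaMaxMin_alt, hinit, B_inv xs x [], List.nil_append]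
  simp [Nat.cast_eq_one]

-- ===== VERDICT (by name: the statement is the Claim_ definition above) =====
theorem calculaMaxMin_spec : Claim_equal_calculaMaxMin := by
  intro arreglo arreglo2 _hDom _hPre
  unfold Spec_calculaMaxMin
  cases arreglo with
  | nil => simp [calculaMaxMin, calculaMaxMin_alt]
  | cons x xs =>
    have hA : calculaMaxMin (x :: xs) arreglo2
        = (if (x :: xs).count (lmin x xs) = 1
            then (if (x :: xs).count (lmax x xs) = 1
                   then arreglo2.set 0 (lmax x xs) else arreglo2).set 1 (lmin x xs)
            else (if (x :: xs).count (lmax x xs) = 1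
                   then arreglo2.set 0 (lmax x xs) else arreglo2)) := by
      simp only [calculaMaxMin]
      rw [A_fold_max, A_fold_min]
    rw [hA, B_closed]
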